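-- pv_equiv track=rewrite | github.com/MorrisHohoho/VehicleTalkDemo | Testing_Scripts/VLC_utils.py | add_frame_number
-- ===== SOURCE A (Python) =====
-- VLC_FRAME_LENGHT = 32
--
-- def add_frame_number(this_data):
--     transmitted_data = []
--     PSN = 0
--     jjj =0;
--     for i in this_data:
--         if(jjj%(VLC_FRAME_LENGHT-1) == 0):
--             transmitted_data.append(PSN)
--             PSN = PSN + 1
--         transmitted_data.append(i)
--         jjj+=1
--     return transmitted_data
-- ===== SOURCE B (Python) =====
-- VLC_FRAME_LENGHT = 32
--
-- def add_frame_number(this_data):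
--     data = list(this_data)
--     out = []
--     psn = 0
--     while data:
--         out.append(psn)
--         out.extend(data[:VLC_FRAME_LENGHT - 1])
--         data = data[VLC_FRAME_LENGHT - 1:]
--         psn += 1
--     return out
-- ===== Notes on version B (the rewrite author's own statement) =====
-- stated objective: simpler
-- what changed: Replaces the per-element loop with a modular counter deciding when to inject a sequence number by a while loop that slices the stream into 31-element chunks and prefixes each chunk with its running PSN.
import Mathlib
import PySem

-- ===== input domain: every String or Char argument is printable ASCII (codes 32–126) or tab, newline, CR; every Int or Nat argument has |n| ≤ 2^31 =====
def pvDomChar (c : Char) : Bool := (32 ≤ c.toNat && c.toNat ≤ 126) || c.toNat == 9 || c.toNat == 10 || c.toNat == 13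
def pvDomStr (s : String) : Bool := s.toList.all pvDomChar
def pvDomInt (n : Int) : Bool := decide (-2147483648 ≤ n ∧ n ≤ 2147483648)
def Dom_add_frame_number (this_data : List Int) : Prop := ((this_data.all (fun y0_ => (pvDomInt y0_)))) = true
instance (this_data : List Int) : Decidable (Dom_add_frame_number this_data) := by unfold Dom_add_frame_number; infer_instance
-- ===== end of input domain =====

-- B replaces A's per-element modular counter with a while loop slicing 31-element chunks; objective: simpler.

-- ===== PORT A =====
-- one step of A's for-loop: state = (transmitted_data, PSN, jjj)
def addFrameStepA (st : List Int × Int × Int) (i : Int) : List Int × Int × Int :=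
  let td := st.1
  let PSN := st.2.1
  let jjj := st.2.2
  if PySem.Int.mod jjj (32 - 1) == 0 then
    (td ++ [PSN] ++ [i], PSN + 1, jjj + 1)
  else
    (td ++ [i], PSN, jjj + 1)

def add_frame_number (this_data : List Int) : List Int :=
  (this_data.foldl addFrameStepA ([], 0, 0)).1

-- ===== PORT B =====
-- B's while loop: out/psn/data are the loop variables
def addFrameGo (out : List Int) (psn : Int) (data : List Int) : List Int :=
  if data = [] then out
  else addFrameGo (out ++ [psn] ++ PySem.List.slice data none (some (32 - 1)))
                  (psn + 1) (PySem.List.slice data (some (32 - 1)) none)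
termination_by data.length
decreasing_by
  rw [PySem.List.slice_from _ (by norm_num)]
  simp only [List.length_drop]
  rename_i h
  have : data.length ≠ 0 := fun hh => h (List.eq_nil_of_length_eq_zero hh)
  omega

def add_frame_number_alt (this_data : List Int) : List Int :=
  addFrameGo [] 0 this_data

-- ===== PRECONDITION & SPEC =====
def Spec_add_frame_number (this_data : List Int) (out : List Int) : Prop := out = add_frame_number_alt this_data
instance (this_data : List Int) (out : List Int) : Decidable (Spec_add_frame_number this_data out) := by unfold Spec_add_frame_number; infer_instance

-- ===== CLAIM (what is proved, stated in full; the proofs are below) =====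
def Claim_equal_add_frame_number : Prop := ∀ (this_data : List Int), Dom_add_frame_number this_data → Spec_add_frame_number this_data (add_frame_number this_data)

-- ===== LEMMAS AND PROOFS =====

theorem addFrameGo_nil (out : List Int) (psn : Int) : addFrameGo out psn [] = out := by
  rw [addFrameGo]; simp

theorem addFrameGo_cons (out : List Int) (psn a : Int) (rest : List Int) :
    addFrameGo out psn (a :: rest)
      = addFrameGo (out ++ [psn] ++ a :: rest.take 30) (psn + 1) (rest.drop 30) := by
  rw [addFrameGo]
  simp only [reduceCtorEq, ite_false]
  rw [PySem.List.slice_to _ (by norm_num), PySem.List.slice_from _ (by norm_num)]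
  rw [show ((32 - 1 : Int)).toNat = 30 + 1 by decide, List.take_succ_cons, List.drop_succ_cons]

-- append accumulation law for B's loop (fuel = a bound on the list length)
theorem addFrameGo_append (n : Nat) :
    ∀ (data out : List Int) (psn : Int), data.length ≤ n →
      addFrameGo out psn data = out ++ addFrameGo [] psn data := by
  induction n with
  | zero =>
    intro data out psn hlen
    have : data = [] := List.eq_nil_of_length_eq_zero (Nat.le_zero.mp hlen)
    subst this; simp [addFrameGo_nil]
  | succ n ih =>
    intro data out psn hlen
    cases data with
    | nil => simp [addFrameGo_nil]
    | cons a rest =>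
      have htail : (rest.drop 30).length ≤ n := by
        simp only [List.length_drop]
        simp only [List.length_cons] at hlen
        omega
      rw [addFrameGo_cons, addFrameGo_cons [] psn a rest]
      conv_lhs => rw [ih _ (out ++ [psn] ++ a :: List.take 30 rest) (psn + 1) htail]
      conv_rhs => rw [ih _ ([] ++ [psn] ++ a :: List.take 30 rest) (psn + 1) htail]
      simp

theorem addFrameGo_append' (out : List Int) (psn : Int) (data : List Int) :
    addFrameGo out psn data = out ++ addFrameGo [] psn data :=
  addFrameGo_append data.length data out psn le_rfl

-- A's loop makes no PSN insertion over a stretch where jjj % 31 never hits 0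
theorem foldA_noTrig (data : List Int) :
    ∀ (td : List Int) (psn j : Int),
      (∀ t : Nat, t < data.length → (j + (t : Int)) % 31 ≠ 0) →
      List.foldl addFrameStepA (td, psn, j) data = (td ++ data, psn, j + data.length) := by
  induction data with
  | nil => intro td psn j _; simp
  | cons a rest ih =>
    intro td psn j h
    have h0 : j % 31 ≠ 0 := by
      simpa using h 0 (by simp)
    have hmod : PySem.Int.mod j (32 - 1) = j % 31 :=
      PySem.Int.mod_eq_emod_of_pos (by norm_num)
    simp only [List.foldl_cons, addFrameStepA, hmod]
    rw [if_neg (by simpa using h0)]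
    rw [ih (td ++ [a]) psn (j + 1) (fun t ht => by
      have := h (t + 1) (by simp only [List.length_cons]; omega)
      push_cast at this ⊢
      convert this using 2
      ring)]
    simp
    omega

-- main invariant: starting at a chunk boundary, A's loop produces B's chunked output
theorem foldA_main (n : Nat) :
    ∀ (data td : List Int) (psn j : Int),
      data.length ≤ n → j % 31 = 0 →
      (List.foldl addFrameStepA (td, psn, j) data).1 = td ++ addFrameGo [] psn data := by
  induction n with
  | zero =>
    intro data td psn j hlen _
    have : data = [] := List.eq_nil_of_length_eq_zero (Nat.le_zero.mp hlen)
    subst this; simp [addFrameGo_nil]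
  | succ n ih =>
    intro data td psn j hlen hj
    cases data with
    | nil => simp [addFrameGo_nil]
    | cons a rest =>
      have hmod : PySem.Int.mod j (32 - 1) = j % 31 :=
        PySem.Int.mod_eq_emod_of_pos (by norm_num)
      simp only [List.foldl_cons, addFrameStepA, hmod, hj]
      rw [if_pos (by simp)]
      have hsplit : rest = rest.take 30 ++ rest.drop 30 := (List.take_append_drop 30 rest).symm
      conv_lhs => rw [hsplit]
      rw [List.foldl_append]
      rw [foldA_noTrig (rest.take 30) (td ++ [psn] ++ [a]) (psn + 1) (j + 1)
        (fun t ht => by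
          have ht30 : t < 30 := lt_of_lt_of_le ht (List.length_take_le 30 rest)
          omega)]
      have htail : (rest.drop 30).length ≤ n := by
        simp only [List.length_drop]
        simp only [List.length_cons] at hlen
        omega
      by_cases hr : 30 ≤ rest.length
      · have hj' : (j + 1 + ((rest.take 30).length : Int)) % 31 = 0 := by
          have h30 : (rest.take 30).length = 30 := by
            simp [List.length_take]; omega
          rw [h30]; omega
        rw [ih (rest.drop 30) _ (psn + 1) _ htail hj']
        conv_rhs => rw [addFrameGo_cons, addFrameGo_append']
        simp
      · have hnil : rest.drop 30 = [] := List.drop_eq_nil_of_le (by omega)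
        rw [hnil]
        simp only [List.foldl_nil]
        conv_rhs => rw [addFrameGo_cons, addFrameGo_append', hnil, addFrameGo_nil]
        simp [List.take_of_length_le (by omega : rest.length ≤ 30)]

-- ===== VERDICT (by name: the statement is the Claim_ definition above) =====
theorem add_frame_number_spec : Claim_equal_add_frame_number := by
  intro this_data _
  unfold Spec_add_frame_number add_frame_number add_frame_number_alt
  rw [foldA_main this_data.length this_data [] 0 0 le_rfl (by norm_num)]
  simp
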